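-- pv_equiv track=rewrite | github.com/sezanhaque/leetcode | Problems/Python/2451. Odd String Difference.py | oddString
-- ===== SOURCE A (Python) =====
-- import collections
--
-- def oddString(words: list[str]) -> str:
--     def calculateDifference(word: str) -> tuple:
--         # Calculate Difference between i and i + 1 of the word
--         return tuple(ord(word[i + 1]) - ord(word[i]) for i in range(len(word) - 1))
--
--     differenceDict = collections.defaultdict(int)
--
--     for word in words:
--         # Store the difference of the words into the hashmap
--         # and their occurrences.
--         differenceDict[calculateDifference(word)] += 1
--
--     for word in words:
--         # Find the word which occurred once.
--         if differenceDict[calculateDifference(word)] == 1: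
--             return word
-- ===== SOURCE B (Python) =====
-- def oddString(words: list[str]) -> str:
--     # Dict-free brute force: precompute each word's consecutive-difference
--     # signature once, then a word is the odd one out iff NO other index holds
--     # the same signature (pairwise index comparison, no hashmap at all).
--     sigs = [[ord(b) - ord(a) for a, b in zip(w, w[1:])] for w in words]
--     n = len(words)
--     for i in range(n):
--         if not any(sigs[j] == sigs[i] and j != i for j in range(n)):
--             return words[i]
-- ===== Notes on version B (the rewrite author's own statement) =====
-- stated objective: alternative
-- what changed: B drops the hashmap entirely: it precomputes every word's difference signature once into a list and decides uniqueness by brute-force pairwise index comparison (for each i, check no j != i has the same signature), instead of A's defaultdict counting pass followed by a second word scan that recomputes each pattern and looks its count up.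
import Mathlib
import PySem

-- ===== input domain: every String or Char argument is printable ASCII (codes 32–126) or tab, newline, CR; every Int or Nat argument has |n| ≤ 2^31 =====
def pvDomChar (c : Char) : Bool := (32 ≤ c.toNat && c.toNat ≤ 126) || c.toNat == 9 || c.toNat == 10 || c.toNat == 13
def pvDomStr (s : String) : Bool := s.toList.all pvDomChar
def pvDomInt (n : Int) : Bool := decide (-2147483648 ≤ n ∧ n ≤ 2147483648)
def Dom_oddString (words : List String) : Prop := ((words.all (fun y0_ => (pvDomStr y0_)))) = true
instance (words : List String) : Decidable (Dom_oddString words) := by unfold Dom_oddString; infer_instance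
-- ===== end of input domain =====

-- B drops A's dict entirely: it precomputes each word's difference signature once into a list
-- and decides uniqueness by brute-force pairwise index comparison (objective: alternative).


-- ===== PORT A =====
-- calculateDifference: tuple(ord(word[i + 1]) - ord(word[i]) for i in range(len(word) - 1))
def calcDiffA (word : String) : List Int :=
  (PySem.List.pyRange 0 (PySem.Str.len word - 1) 1).map
    (fun i => ((PySem.List.pyGetD word.toList (i + 1) 'a').toNat : Int)
              - ((PySem.List.pyGetD word.toList i 'a').toNat : Int))

def oddString (words : List String) : String :=
  let differenceDict :=
    words.foldl (fun d w => d.insert (calcDiffA w) (d.getD (calcDiffA w) 0 + 1))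
      (PySem.Dict.empty : PySem.Dict (List Int) Int)
  match words.find? (fun w => differenceDict.getD (calcDiffA w) 0 == 1) with
  | some w => w
  | none => ""          -- Python falls off the loop and returns None here; excluded by Pre_

-- ===== PORT B =====
-- [ord(b) - ord(a) for a, b in zip(w, w[1:])]
def sigB (w : String) : List Int :=
  (w.toList.zip (PySem.List.slice w.toList (some 1) none)).map
    (fun p => ((p.2.toNat : Int) - (p.1.toNat : Int)))

def oddString_alt (words : List String) : String :=
  let sigs := words.map sigB
  let n : Int := (words.length : Int)
  match (PySem.List.pyRange 0 n 1).find? (fun i =>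
      !((PySem.List.pyRange 0 n 1).any (fun j =>
          (PySem.List.pyGetD sigs j [] == PySem.List.pyGetD sigs i []) && j != i))) with
  | some i => PySem.List.pyGetD words i ""
  | none => ""          -- Python falls off the loop and returns None here; excluded by Pre_

-- ===== PRECONDITION & SPEC =====
-- Pre_ excludes exactly the inputs on which no word's difference pattern is unique: there the
-- Python A (and the Python B) falls off its loop and returns None, which is not a str.
def Pre_oddString (words : List String) : Prop :=
  ∃ w ∈ words, (words.map sigB).count (sigB w) = 1
instance (words : List String) : Decidable (Pre_oddString words) := by
  unfold Pre_oddString; infer_instance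

def pvWitness_oddString : List String := ["aaa", "bob", "ccc", "ddd"]

def Spec_oddString (words : List String) (out : String) : Prop := out = oddString_alt words
instance (words : List String) (out : String) : Decidable (Spec_oddString words out) := by
  unfold Spec_oddString; infer_instance

-- ===== CLAIM (what is proved, stated in full; the proofs are below) =====
def Claim_equal_oddString : Prop := ∀ (words : List String), Dom_oddString words → Pre_oddString words → Spec_oddString words (oddString words)

-- ===== LEMMAS AND PROOFS =====

-- both difference computations equal the zip-with-tail form on the char list
def pdiff (cs : List Char) : List Int :=
  (cs.zip cs.tail).map (fun p => ((p.2.toNat : Int) - (p.1.toNat : Int)))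

theorem sigB_eq (w : String) : sigB w = pdiff w.toList := by
  rw [sigB, PySem.List.slice_from_one]; rfl

theorem calcDiffA_eq (w : String) : calcDiffA w = pdiff w.toList := by
  have hl : w.toList.length = w.length := String.length_toList
  rw [calcDiffA, PySem.Str.len_eq, PySem.List.pyRange_one]
  apply List.ext_getElem
  · simp [pdiff]
  · intro k h1 h2
    simp only [List.getElem_map, List.getElem_range, pdiff, List.getElem_zip, List.getElem_tail]
    have hk : k < w.toList.length - 1 := by simp at h1; omega
    have e1 : (0 : Int) + (k : Int) + 1 = ((k + 1 : Nat) : Int) := by omega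
    have e0 : (0 : Int) + (k : Int) = ((k : Nat) : Int) := by omega
    rw [e1, e0, PySem.List.pyGetD_natCast, PySem.List.pyGetD_natCast,
        List.getD_eq_getElem _ _ (by omega), List.getD_eq_getElem _ _ (by omega)]

theorem calcDiffA_eq_sigB (w : String) : calcDiffA w = sigB w :=
  (calcDiffA_eq w).trans (sigB_eq w).symm

-- A's counting fold is Counter of the mapped patterns
theorem countsA (words : List String) :
    words.foldl (fun d w => d.insert (calcDiffA w) (d.getD (calcDiffA w) 0 + 1))
      (PySem.Dict.empty : PySem.Dict (List Int) Int)
    = PySem.Dict.counter (words.map calcDiffA) := by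
  rw [← PySem.Dict.foldl_insert_getD_add_one_eq_counter, List.foldl_map]

-- count of an element equals the number of indices holding it
theorem count_filter_range (xs : List (List Int)) (x : List Int) :
    xs.count x = ((List.range xs.length).filter (fun j => xs.getD j [] == x)).length := by
  induction xs with
  | nil => simp
  | cons a xs ih =>
    have hc : (fun j => (a :: xs).getD j ([] : List Int) == x) ∘ Nat.succ
        = (fun j => xs.getD j [] == x) := by
      funext j; rfl
    rw [List.length_cons, List.range_succ_eq_map, List.filter_cons, List.filter_map, hc]
    by_cases h : a = x <;> simp [h, ih]

-- a nodup list containing k has length 1 iff every element is k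
theorem nodup_length_one {l : List Nat} (hnd : l.Nodup) {k : Nat} (hk : k ∈ l) :
    l.length = 1 ↔ ∀ j ∈ l, j = k := by
  constructor
  · intro h1 j hj
    obtain ⟨x, hx⟩ := List.length_eq_one_iff.mp h1
    subst hx; simp at hk hj; omega
  · intro hall
    cases l with
    | nil => simp at hk
    | cons a t =>
      have ha : a = k := hall a (by simp)
      cases t with
      | nil => rfl
      | cons b t' =>
        have hb : b = k := hall b (by simp)
        have hmem : a ∈ b :: t' := by rw [ha, ← hb]; exact List.mem_cons_self
        rw [List.nodup_cons] at hnd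
        exact absurd hmem hnd.1

-- uniqueness by pairwise index comparison = count one
theorem count_one_iff_no_other (xs : List (List Int)) (k : Nat) (hk : k < xs.length) :
    (xs.count (xs.getD k []) = 1)
      ↔ ¬ ∃ j, j < xs.length ∧ j ≠ k ∧ xs.getD j [] = xs.getD k [] := by
  rw [count_filter_range xs (xs.getD k [])]
  have hknd : (List.range xs.length).Nodup := List.nodup_range
  have hkmem : k ∈ (List.range xs.length).filter (fun j => xs.getD j [] == xs.getD k []) := by
    rw [List.mem_filter]; exact ⟨List.mem_range.mpr hk, beq_iff_eq.mpr rfl⟩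
  rw [nodup_length_one (hknd.filter _) hkmem]
  constructor
  · rintro hall ⟨j, hj, hjk, hje⟩
    exact hjk (hall j (by rw [List.mem_filter]; exact ⟨List.mem_range.mpr hj, beq_iff_eq.mpr hje⟩))
  · intro hno j hj
    rw [List.mem_filter, List.mem_range, beq_iff_eq] at hj
    by_contra hne
    exact hno ⟨j, hj.1, hne, hj.2⟩

-- find? over a predicate read through getD at range indices is find? over the list
theorem find?_range_getD {α : Type} (xs : List α) (p : α → Bool) (d : α) :
    ((List.range xs.length).find? (fun k => p (xs.getD k d))).map (fun k => xs.getD k d)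
      = xs.find? p := by
  induction xs with
  | nil => simp
  | cons a xs ih =>
    rw [List.length_cons, List.range_succ_eq_map]
    by_cases h : p a
    · rw [List.find?_cons_of_pos (by simpa using h), List.find?_cons_of_pos h]
      simp
    · rw [List.find?_cons_of_neg (by simpa using h), List.find?_cons_of_neg h,
          List.find?_map, Option.map_map]
      have hc : (fun k => p ((a :: xs).getD k d)) ∘ Nat.succ = (fun k => p (xs.getD k d)) := by
        funext k; rfl
      have hm : (fun k => (a :: xs).getD k d) ∘ Nat.succ = (fun k => xs.getD k d) := by
        funext k; rfl
      rw [hc, hm, ih]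

-- find? respects pointwise-equal predicates on the list
theorem find?_congr {α : Type} {l : List α} {p q : α → Bool} (h : ∀ x ∈ l, p x = q x) :
    l.find? p = l.find? q := by
  induction l with
  | nil => rfl
  | cons a t ih =>
    rw [List.find?_cons, List.find?_cons, h a (by simp),
        ih (fun x hx => h x (by simp [hx]))]

-- ===== VERDICT (by name: the statement is the Claim_ definition above) =====
theorem oddString_spec : Claim_equal_oddString := by
  intro words _ hpre
  unfold Spec_oddString
  have hmapeq : words.map calcDiffA = words.map sigB :=
    List.map_congr_left (fun w _ => calcDiffA_eq_sigB w)
  set sigs := words.map sigB with hsigs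
  set P : String → Bool := fun w => sigs.count (sigB w) == 1 with hP
  -- A's result is the first word whose pattern count is 1
  have hA : oddString words = (match words.find? P with | some w => w | none => "") := by
    rw [oddString, countsA]
    have hp : (fun w => (PySem.Dict.counter (words.map calcDiffA)).getD (calcDiffA w) 0 == 1)
        = P := by
      funext w
      rw [PySem.Dict.getD_counter, hmapeq, calcDiffA_eq_sigB, hP]
      simp [Nat.cast_eq_one]
    rw [hp]
  -- B's result is the same first word
  have hB : oddString_alt words = (match words.find? P with | some w => w | none => "") := by
    simp only [oddString_alt]
    rw [PySem.List.pyRange_zero_natCast, List.find?_map]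
    have hpw : ∀ k ∈ List.range words.length,
        (((fun i => !((List.map (fun k : Nat => (k : Int)) (List.range words.length)).any
              (fun j => (PySem.List.pyGetD (List.map sigB words) j []
                          == PySem.List.pyGetD (List.map sigB words) i []) && j != i)))
            ∘ (fun k : Nat => (k : Int))) k)
          = P (words.getD k "") := by
      intro k hk
      rw [List.mem_range] at hk
      simp only [Function.comp_apply, List.any_map, ← hsigs]
      have hsig : sigs.getD k [] = sigB (words.getD k "") := by
        rw [hsigs, List.getD_eq_getElem _ _ (by simp [hk]),
            List.getD_eq_getElem _ _ hk, List.getElem_map]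
      have hcnt := count_one_iff_no_other sigs k (by rw [hsigs]; simp [hk])
      have hlen : sigs.length = words.length := by rw [hsigs, List.length_map]
      have hPk : P (words.getD k "") = (sigs.count (sigs.getD k []) == 1) := by rw [hsig]
      show _ = P (words.getD k "")
      rw [hPk, Bool.eq_iff_iff]
      simp only [Bool.not_eq_true', List.any_eq_false, Function.comp_apply,
        PySem.List.pyGetD_natCast, List.mem_range, beq_iff_eq]
      rw [hcnt]
      constructor
      · rintro hall ⟨j, hj1, hj2, hj3⟩
        have hthis := hall j (by omega)
        simp only [Bool.and_eq_true, beq_iff_eq, bne_iff_ne, ne_eq, Nat.cast_inj, not_and,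
          Decidable.not_not] at hthis
        exact hj2 (hthis hj3)
      · intro hno j hj
        simp only [Bool.and_eq_true, beq_iff_eq, bne_iff_ne, ne_eq, Nat.cast_inj, not_and,
          Decidable.not_not]
        intro hje
        by_contra hne
        exact hno ⟨j, by omega, hne, hje⟩
    rw [find?_congr hpw]
    have hfr := find?_range_getD words P ""
    cases hfo : (List.range words.length).find? (fun k => P (words.getD k "")) with
    | none =>
      rw [hfo] at hfr
      simp only [Option.map_none] at hfr
      rw [← hfr]
      rfl
    | some k =>
      rw [hfo] at hfr
      simp only [Option.map_some] at hfr
      rw [← hfr]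
      simp [PySem.List.pyGetD_natCast]
  rw [hA, hB]
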